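-- pv_equiv track=rewrite | github.com/UdeS-CoBIUS/aliFreeFoldMulti | aliFreeFoldMulti/align_seq_struct3.py | computeRefStems
-- ===== SOURCE A (Python) =====
-- def computeMaxStems(seq,initStems,k):
--     """Function that computes maximum size stems of a RNA sequence
--        given initial stems
--
--     Args:
--         seq (nucleotide string): A RNA sequence
--         initStems (array of stems) : An array of all stems of length k in seq
--         k (int) : length of all stems contained in initStems
--
--     Returns:
--         stems (array of stems) : An array of all maximum size stems of seq
--
--     """
--     initStems.sort()
--     stems = initStems
--     i = 0
--     # For each stem stems[i] of length k
--     while(i < len(stems)):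
--         s,e,k = stems[i]
--         j=1
--
--         # While extendable
--         while([s+j,e-j,k] in stems[i+1:]):
--             # Extend it
--             stems[i] = [s,e,k+j]
--             # Remove included stem
--             stems.remove([s+j,e-j,k])
--             j+=1
--         i+=1
--     return stems
--
-- def computeRefStems(refSeq,refStr):
--     """Function that computes the stems of a RNA secondary structure
--
--     Args:
--         refSeq (string of nucleotides) : A RNA sequence
--         refStr (string of {.,(,)}): A secondary structure for refSeq
--
--     Returns:
--         stems (array of stems) : An array of all stems of refStr
--
--     """
--     bracketPile = []
--     initStems = []
--     # Compute all base pairs (stems of length 1)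
--     for i in range(len(refStr)):
--         if(refStr[i]=='('):
--             bracketPile.append(i)
--         if((refStr[i]==')')):
--             initStems.append([bracketPile[-1],i,1])
--             del bracketPile[-1]
--     # Compute maximum size stems
--     stems = computeMaxStems(refSeq,initStems,1)
--     return stems
-- ===== SOURCE B (Python) =====
-- def computeRefStems(refSeq, refStr):
--     pile = []
--     pairs = []
--     for i, c in enumerate(refStr):
--         if c == '(':
--             pile.append(i)
--         elif c == ')':
--             pairs.append((pile.pop(), i))
--     pairs.sort()
--     stems = []
--     for s, e in pairs:
--         if stems and s == stems[-1][0] + stems[-1][2] and e == stems[-1][1] - stems[-1][2]: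
--             stems[-1][2] += 1
--         else:
--             stems.append([s, e, 1])
--     return stems
-- ===== Notes on version B (the rewrite author's own statement) =====
-- stated objective: alternative
-- what changed: A sorts the base pairs and then repeatedly rescans and mutates the stem list (slice membership test plus list.remove per extension) to grow stems; B sorts the pairs once and merges them in a single linear pass that either extends the last stem or starts a new one.
import Mathlib
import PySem

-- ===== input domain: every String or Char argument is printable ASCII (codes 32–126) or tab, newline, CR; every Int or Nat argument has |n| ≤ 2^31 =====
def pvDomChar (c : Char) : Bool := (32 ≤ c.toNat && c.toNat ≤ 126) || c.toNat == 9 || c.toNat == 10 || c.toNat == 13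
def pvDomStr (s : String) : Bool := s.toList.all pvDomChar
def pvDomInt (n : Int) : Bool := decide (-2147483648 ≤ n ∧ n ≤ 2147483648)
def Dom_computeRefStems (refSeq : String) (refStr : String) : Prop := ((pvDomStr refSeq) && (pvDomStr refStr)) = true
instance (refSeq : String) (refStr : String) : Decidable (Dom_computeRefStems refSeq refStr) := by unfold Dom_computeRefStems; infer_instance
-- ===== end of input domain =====

-- B (alternative algorithm): instead of A's repeated slice-membership scans and list.remove
-- mutations, B sorts the base pairs once and merges them in ONE linear pass
-- (extend the last stem or start a new one).

-- ===== PORT A =====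
-- parse loop of computeRefStems: bracketPile / initStems; none = IndexError (bracketPile[-1] on an empty pile)
def pvParseA : List Char → Int → List Int → List (List Int) → Option (List (List Int))
  | [], _, _, acc => some acc
  | c :: cs, i, pile, acc =>
    let pile1 := if c = '(' then pile ++ [i] else pile
    if c = ')' then
      match PySem.List.pyGet? pile1 (-1) with
      | some s => pvParseA cs (i + 1) pile1.dropLast (acc ++ [[s, i, 1]])
      | none => none
    else
      pvParseA cs (i + 1) pile1 acc

-- step bound for the inner while loop (cited by pvInner's decreasing_by)
lemma pvRemove_len {v w : List Int} {stems : List (List Int)} {i : Nat}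
    (h : v ∈ stems.drop (i + 1)) :
    ((PySem.List.remove? (stems.set i w) v).getD (stems.set i w)).length < stems.length := by
  have hv : v ∈ stems.set i w := by
    have : (stems.set i w).drop (i + 1) = stems.drop (i + 1) := by
      rw [List.drop_set]; simp
    exact List.mem_of_mem_drop (l := stems.set i w) (by rw [this]; exact h)
  rw [PySem.List.remove?_eq_some_erase _ _ hv]
  have h1 := List.length_erase_of_mem hv
  have h2 : 0 < (stems.set i w).length := List.length_pos_of_mem hv
  have h3 : (stems.set i w).length = stems.length := List.length_set ..
  simp only [Option.getD_some]
  omega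

-- inner while loop of computeMaxStems ('while [s+j,e-j,k] in stems[i+1:]'); the remove? always
-- succeeds when the guard holds, so getD's default is never used
def pvInner (stems : List (List Int)) (i : Nat) (s e k j : Int) : List (List Int) :=
  if h : [s + j, e - j, k] ∈ stems.drop (i + 1) then
    pvInner ((PySem.List.remove? (stems.set i [s, e, k + j]) [s + j, e - j, k]).getD
        (stems.set i [s, e, k + j])) i s e k (j + 1)
  else stems
termination_by stems.length
decreasing_by exact pvRemove_len h

lemma pvInner_length_le (stems : List (List Int)) (i : Nat) (s e k j : Int) :
    (pvInner stems i s e k j).length ≤ stems.length := by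
  fun_induction pvInner with
  | case1 stems j h ih =>
    have := pvRemove_len (w := [s, e, k + j]) h
    omega
  | case2 => exact le_rfl

-- outer while loop of computeMaxStems
def pvOuter (stems : List (List Int)) (i : Nat) : List (List Int) :=
  if h : i < stems.length then
    match stems[i] with
    | [s, e, k] => pvOuter (pvInner stems i s e k 1) (i + 1)
    | _ => stems  -- unreachable from computeRefStems: Python's 's,e,k = stems[i]' would raise
  else stems
termination_by stems.length - i
decreasing_by
  have := pvInner_length_le stems i s e k 1
  omega

def computeMaxStems (seq : String) (initStems : List (List Int)) (k : Int) : List (List Int) :=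
  pvOuter (PySem.List.sorted initStems (fun x => x) false) 0

def computeRefStems (refSeq : String) (refStr : String) : List (List Int) :=
  match pvParseA refStr.toList 0 [] [] with
  | some initStems => computeMaxStems refSeq initStems 1
  | none => []  -- Python raises IndexError here; excluded by Pre_

-- ===== PORT B =====
-- parse loop of B: same scan, pairs as tuples; none = IndexError (pile.pop() on an empty pile)
def pvParseB : List Char → Int → List Int → List (Int × Int) → Option (List (Int × Int))
  | [], _, _, pairs => some pairs
  | c :: cs, i, pile, pairs =>
    if c = '(' then pvParseB cs (i + 1) (pile ++ [i]) pairs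
    else if c = ')' then
      match PySem.List.pyGet? pile (-1) with
      | some s => pvParseB cs (i + 1) pile.dropLast (pairs ++ [(s, i)])
      | none => none
    else pvParseB cs (i + 1) pile pairs

-- one step of B's linear merge pass: extend the last stem or append a new one
def pvMergeStep (stems : List (List Int)) (p : Int × Int) : List (List Int) :=
  match stems.getLast? with
  | some [s0, e0, k0] =>
    if p.1 = s0 + k0 ∧ p.2 = e0 - k0 then stems.dropLast ++ [[s0, e0, k0 + 1]]
    else stems ++ [[p.1, p.2, 1]]
  | _ => stems ++ [[p.1, p.2, 1]]

def computeRefStems_alt (refSeq : String) (refStr : String) : List (List Int) :=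
  match pvParseB refStr.toList 0 [] [] with
  | some pairs =>
    (PySem.List.sorted2 pairs (fun p => p.1) (fun p => p.2) false).foldl pvMergeStep []
  | none => []  -- Python raises IndexError here; excluded by Pre_

-- ===== PRECONDITION & SPEC =====
-- Pre_ excludes exactly the structure strings with some ')' not preceded by a matching '(' :
-- there Python A (and Python B) raise IndexError on the empty bracket pile.
def Pre_computeRefStems (refSeq : String) (refStr : String) : Prop :=
  ∀ n ∈ List.range (refStr.toList.length + 1),
    (refStr.toList.take n).count ')' ≤ (refStr.toList.take n).count '('
instance (refSeq : String) (refStr : String) : Decidable (Pre_computeRefStems refSeq refStr) := by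
  unfold Pre_computeRefStems; infer_instance
def pvWitness_computeRefStems : String × String := ("GGGAAAUCCC", "(((....)))")

def Spec_computeRefStems (refSeq : String) (refStr : String) (out : List (List Int)) : Prop :=
  out = computeRefStems_alt refSeq refStr
instance (refSeq : String) (refStr : String) (out : List (List Int)) :
    Decidable (Spec_computeRefStems refSeq refStr out) := by
  unfold Spec_computeRefStems; infer_instance

-- ===== CLAIM (what is proved, stated in full; the proofs are below) =====
def Claim_equal_computeRefStems : Prop := ∀ (refSeq : String) (refStr : String), Dom_computeRefStems refSeq refStr → Pre_computeRefStems refSeq refStr → Spec_computeRefStems refSeq refStr (computeRefStems refSeq refStr)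

-- ===== LEMMAS AND PROOFS =====

-- a base pair as the triple A manipulates
def pvTripl (p : Int × Int) : List Int := [p.1, p.2, 1]

-- the two parse loops run in lockstep
lemma pvParse_rel : ∀ (cs : List Char) (i : Int) (pile : List Int) (pacc : List (Int × Int)),
    pvParseA cs i pile (pacc.map pvTripl) = (pvParseB cs i pile pacc).map (List.map pvTripl) := by
  intro cs
  induction cs with
  | nil => intro i pile pacc; simp [pvParseA, pvParseB]
  | cons c cs ih =>
    intro i pile pacc
    by_cases h1 : c = '('
    · have h2 : c ≠ ')' := by rw [h1]; decide
      simpa [pvParseA, pvParseB, h1, h2] using ih (i + 1) (pile ++ [i]) pacc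
    · by_cases h2 : c = ')'
      · simp only [pvParseA, pvParseB, h2]
        simp only [if_neg (show ¬(')' = '(') by decide)]
        cases hg : PySem.List.pyGet? pile (-1) with
        | none => rfl
        | some v => simpa [pvTripl] using ih (i + 1) pile.dropLast (pacc ++ [(v, i)])
      · simpa [pvParseA, pvParseB, h1, h2] using ih (i + 1) pile pacc

-- the first components of the produced pairs are distinct
lemma pvParseB_nodup : ∀ (cs : List Char) (i : Int) (pile : List Int) (pacc : List (Int × Int))
    (P : List (Int × Int)),
    pvParseB cs i pile pacc = some P →
    (pile ++ pacc.map Prod.fst).Nodup →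
    (∀ x ∈ pile ++ pacc.map Prod.fst, x < i) →
    (P.map Prod.fst).Nodup := by
  intro cs
  induction cs with
  | nil =>
    intro i pile pacc P hP hnd _
    obtain rfl : pacc = P := by simpa [pvParseB] using hP
    exact hnd.of_append_right
  | cons c cs ih =>
    intro i pile pacc P hP hnd hlt
    by_cases h1 : c = '('
    · rw [pvParseB, if_pos h1] at hP
      refine ih (i + 1) (pile ++ [i]) pacc P hP ?_ ?_
      · have hperm : ((pile ++ [i]) ++ pacc.map Prod.fst).Perm
            (i :: (pile ++ pacc.map Prod.fst)) := by
          rw [List.append_assoc]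
          exact List.perm_middle
        rw [hperm.nodup_iff, List.nodup_cons]
        exact ⟨fun hm => absurd (hlt i hm) (by omega), hnd⟩
      · intro x hx
        simp only [List.append_assoc, List.mem_append, List.mem_singleton] at hx
        rcases hx with hx | hx | hx
        · have := hlt x (List.mem_append_left _ hx); omega
        · omega
        · have := hlt x (List.mem_append_right _ hx); omega
    · by_cases h2 : c = ')'
      · rw [pvParseB, if_neg h1, if_pos h2] at hP
        revert hP
        cases hg : PySem.List.pyGet? pile (-1) with
        | none => intro hP; simp at hP
        | some v =>
          intro hP
          have hvlast : pile.getLast? = some v := by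
            simpa [PySem.List.pyGet?_neg_one] using hg
          obtain ⟨pile', rfl⟩ := List.getLast?_eq_some_iff.mp hvlast
          refine ih (i + 1) (pile' ++ [v]).dropLast (pacc ++ [(v, i)]) P hP ?_ ?_
          · rw [List.dropLast_concat]
            have hperm : (pile' ++ ((pacc ++ [(v, i)]).map Prod.fst)).Perm
                ((pile' ++ [v]) ++ pacc.map Prod.fst) := by
              rw [List.append_assoc]
              refine List.Perm.append_left pile' ?_
              have h := List.perm_append_comm (l₁ := pacc.map Prod.fst) (l₂ := [v])
              simp only [List.map_append, List.map_cons, List.map_nil, List.singleton_append]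
              exact h
            exact hperm.nodup_iff.mpr hnd
          · intro x hx
            simp only [List.dropLast_concat, List.map_append, List.mem_append,
              List.map_cons, List.map_nil, List.mem_singleton] at hx
            rcases hx with hx | hx | hx
            · have := hlt x (List.mem_append_left _ (List.mem_append_left _ hx)); omega
            · have := hlt x (List.mem_append_right _ hx); omega
            · have hv : v ∈ pile' ++ [v] := by simp
              have := hlt v (List.mem_append_left _ hv); omega
      · rw [pvParseB, if_neg h1, if_neg h2] at hP
        exact ih (i + 1) pile pacc P hP hnd (fun x hx => by have := hlt x hx; omega)

-- greedy diagonal-run extraction: reference form both merge loops are reduced to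
def pvEat (s e j : Int) : List (Int × Int) → Int × List (Int × Int)
  | [] => (j, [])
  | p :: rest => if p.1 = s + j ∧ p.2 = e - j then pvEat s e (j + 1) rest else (j, p :: rest)

lemma pvEat_suffix (s e : Int) : ∀ (l : List (Int × Int)) (j : Int), (pvEat s e j l).2.IsSuffix l := by
  intro l
  induction l with
  | nil => intro j; simp [pvEat]
  | cons p rest ih =>
    intro j
    rw [pvEat]
    split
    · exact (ih (j + 1)).trans (List.suffix_cons p rest)
    · exact List.suffix_refl _

def pvMerge : List (Int × Int) → List (List Int)
  | [] => []
  | p :: rest => [p.1, p.2, (pvEat p.1 p.2 1 rest).1] :: pvMerge (pvEat p.1 p.2 1 rest).2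
termination_by l => l.length
decreasing_by
  have := List.IsSuffix.length_le (pvEat_suffix p.1 p.2 (rest) 1)
  simp only [List.length_cons]; omega

-- B's fold is pvMerge
lemma pvFold_from : ∀ (Q : List (Int × Int)) (acc : List (List Int)) (s e j : Int),
    Q.foldl pvMergeStep (acc ++ [[s, e, j]]) =
      acc ++ [s, e, (pvEat s e j Q).1] :: pvMerge (pvEat s e j Q).2 := by
  intro Q
  induction Q with
  | nil => intro acc s e j; simp [pvEat, pvMerge]
  | cons p rest ih =>
    intro acc s e j
    rw [List.foldl_cons]
    have hlast : (acc ++ [[s, e, j]]).getLast? = some [s, e, j] := by simp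
    by_cases hc : p.1 = s + j ∧ p.2 = e - j
    · have hstep : pvMergeStep (acc ++ [[s, e, j]]) p = acc ++ [[s, e, j + 1]] := by
        rw [pvMergeStep, hlast]
        simp [if_pos hc]
      rw [hstep, ih acc s e (j + 1), pvEat, if_pos hc]
    · have hstep : pvMergeStep (acc ++ [[s, e, j]]) p =
          (acc ++ [[s, e, j]]) ++ [[p.1, p.2, 1]] := by
        rw [pvMergeStep, hlast]
        simp [if_neg hc]
      rw [hstep, ih (acc ++ [[s, e, j]]) p.1 p.2 1, pvEat, if_neg hc]
      simp [pvMerge, List.append_assoc]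

lemma pvFold_eq_merge (Q : List (Int × Int)) : Q.foldl pvMergeStep [] = pvMerge Q := by
  cases Q with
  | nil => simp [pvMerge]
  | cons p rest =>
    rw [List.foldl_cons]
    have hstep : pvMergeStep [] p = [] ++ [[p.1, p.2, 1]] := by rw [pvMergeStep]; rfl
    rw [hstep, pvFold_from rest [] p.1 p.2 1]
    simp [pvMerge]

-- sorted2's comparison on pairs
def pvBefore (a b : Int × Int) : Bool :=
  decide (a.1 < b.1) || !decide (b.1 < a.1) && decide (a.2 < b.2)

lemma pvBefore_tripl (p q : Int × Int) :
    (decide (pvTripl p < pvTripl q)) = pvBefore p q := by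
  by_cases h1 : p.1 < q.1 <;> by_cases h2 : q.1 < p.1 <;> by_cases h3 : p.2 < q.2 <;>
    simp [pvTripl, pvBefore, List.cons_lt_cons_iff, h1, h2, h3] <;> omega

lemma pvInsertBy_map (p : Int × Int) : ∀ (acc : List (Int × Int)),
    (PySem.List.insertBy pvBefore p acc).map pvTripl =
      PySem.List.insertBy (fun a b : List Int => decide (a < b)) (pvTripl p) (acc.map pvTripl) := by
  intro acc
  induction acc with
  | nil => simp [PySem.List.insertBy]
  | cons q rest ih =>
    by_cases hb : pvBefore p q = true
    · simp [PySem.List.insertBy, pvBefore_tripl, hb]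
    · simp only [Bool.not_eq_true] at hb
      simp [PySem.List.insertBy, pvBefore_tripl, hb, ih]

lemma pvFoldl_sort_map (P : List (Int × Int)) : ∀ (acc : List (Int × Int)),
    (P.foldl (fun acc x => PySem.List.insertBy pvBefore x acc) acc).map pvTripl =
      (P.map pvTripl).foldl
        (fun acc x => PySem.List.insertBy (fun a b : List Int => decide (a < b)) x acc)
        (acc.map pvTripl) := by
  induction P with
  | nil => intro acc; simp
  | cons p rest ih =>
    intro acc
    rw [List.map_cons, List.foldl_cons, List.foldl_cons, ih, pvInsertBy_map]

-- A sorts the triples exactly as B sorts the pairs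
lemma pvSorted_map (P : List (Int × Int)) :
    PySem.List.sorted (P.map pvTripl) (fun x => x) false =
      (PySem.List.sorted2 P (fun p => p.1) (fun p => p.2) false).map pvTripl :=
  (pvFoldl_sort_map P []).symm

-- insertion sort order invariant for pvBefore
lemma pvInsertBy_pairwise (p : Int × Int) (acc : List (Int × Int))
    (h : acc.Pairwise (fun a b => pvBefore b a = false)) :
    (PySem.List.insertBy pvBefore p acc).Pairwise (fun a b => pvBefore b a = false) := by
  have hasym : ∀ a b : Int × Int, pvBefore a b = true → pvBefore b a = false := by
    intro a b hab
    simp [pvBefore] at hab ⊢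
    omega
  have htrans : ∀ x y z : Int × Int,
      pvBefore x y = true → pvBefore z y = false → pvBefore z x = false := by
    intro x y z h1 h2
    simp [pvBefore] at h1 h2 ⊢
    omega
  revert h
  induction acc with
  | nil => intro h; simp [PySem.List.insertBy]
  | cons q rest ih =>
    intro h
    obtain ⟨hq, hrest⟩ := List.pairwise_cons.mp h
    rw [PySem.List.insertBy]
    by_cases hb : pvBefore p q = true
    · rw [if_pos hb]
      refine List.pairwise_cons.mpr ⟨?_, h⟩
      intro z hz
      rcases List.mem_cons.mp hz with hzq | hz
      · rw [hzq]; exact hasym p q hb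
      · exact htrans p q z hb (hq z hz)
    · rw [if_neg hb]
      refine List.pairwise_cons.mpr ⟨?_, ih hrest⟩
      intro z hz
      rcases (PySem.List.mem_insertBy pvBefore p z rest).mp hz with hzp | hz
      · rw [hzp]; simpa using hb
      · exact hq z hz

lemma pvFoldl_pairwise (P : List (Int × Int)) : ∀ (acc : List (Int × Int)),
    acc.Pairwise (fun a b => pvBefore b a = false) →
    (P.foldl (fun acc x => PySem.List.insertBy pvBefore x acc) acc).Pairwise
      (fun a b => pvBefore b a = false) := by
  induction P with
  | nil => intro acc h; exact h
  | cons p rest ih =>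
    intro acc h
    rw [List.foldl_cons]
    exact ih _ (pvInsertBy_pairwise p acc h)

lemma pvSorted2_pairwise (P : List (Int × Int)) :
    (PySem.List.sorted2 P (fun p => p.1) (fun p => p.2) false).Pairwise
      (fun a b => pvBefore b a = false) :=
  pvFoldl_pairwise P [] (by simp)

-- with distinct first components the sorted pairs are strictly increasing in the first component
lemma pvQ_pairwise (P : List (Int × Int)) (h : (P.map Prod.fst).Nodup) :
    (PySem.List.sorted2 P (fun p => p.1) (fun p => p.2) false).Pairwise
      (fun a b => a.1 < b.1) := by
  have hp := pvSorted2_pairwise P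
  have hperm := PySem.List.sorted2_perm P (fun p => p.1) (fun p => p.2) false
  have hne : P.Pairwise (fun a b : Int × Int => a.1 ≠ b.1) := by
    simpa [List.Nodup, List.pairwise_map] using h
  have hne' := (List.Perm.pairwise_iff (fun {a b} hab => Ne.symm hab) hperm).mpr hne
  exact (hp.and hne').imp (fun {a b} hab => by
    obtain ⟨h1, h2⟩ := hab
    simp [pvBefore] at h1
    omega)

-- list surgery around position done.length
lemma pvDrop_mid {α : Type} (done : List α) (x : α) (l : List α) :
    (done ++ x :: l).drop (done.length + 1) = l := by
  have h1 : done ++ x :: l = (done ++ [x]) ++ l := by simp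
  have h2 : done.length + 1 = (done ++ [x]).length := by simp
  rw [h1, h2, List.drop_left]

lemma pvSet_mid {α : Type} (done : List α) (x y : α) (l : List α) :
    (done ++ x :: l).set done.length y = done ++ y :: l := by
  induction done with
  | nil => simp
  | cons d ds ih => simp only [List.cons_append, List.set_cons_succ, List.length_cons]; rw [ih]

lemma pvGet_mid (done : List (List Int)) (x : List Int) (l : List (List Int))
    (h : done.length < (done ++ x :: l).length) :
    (done ++ x :: l)[done.length]'h = x := by
  rw [List.getElem_append_right (le_refl done.length)]
  simp

lemma pvMem_map_tripl (L : List (Int × Int)) (a b : Int) :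
    [a, b, 1] ∈ L.map pvTripl ↔ (a, b) ∈ L := by
  constructor
  · intro hm
    obtain ⟨q, hq, he⟩ := List.mem_map.mp hm
    simp [pvTripl] at he
    obtain ⟨h1, h2⟩ := he
    cases q
    simp_all
  · intro hm
    exact List.mem_map.mpr ⟨(a, b), hm, rfl⟩

-- A's inner while loop eats exactly the consecutive diagonal extensions
lemma pvInner_eq : ∀ (rest : List (Int × Int)) (done : List (List Int)) (s e j : Int),
    1 ≤ j →
    (∀ p ∈ rest, pvTripl p ∉ done) →
    (∀ p ∈ rest, s + j ≤ p.1) →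
    rest.Pairwise (fun p q => p.1 < q.1) →
    pvInner (done ++ [s, e, j] :: rest.map pvTripl) done.length s e 1 j =
      done ++ [s, e, (pvEat s e j rest).1] :: (pvEat s e j rest).2.map pvTripl := by
  intro rest
  induction rest with
  | nil =>
    intro done s e j hj hdone hge hpair
    rw [pvInner]
    simp only [List.map_nil]
    rw [pvDrop_mid]
    simp [pvEat]
  | cons p rest' ih =>
    intro done s e j hj hdone hge hpair
    obtain ⟨hphead, hptail⟩ := List.pairwise_cons.mp hpair
    by_cases hc : p.1 = s + j ∧ p.2 = e - j
    · have hp : (s + j, e - j) = p := by obtain ⟨h1, h2⟩ := hc; cases p; simp_all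
      have hmem : [s + j, e - j, 1] ∈
          (done ++ [s, e, j] :: (p :: rest').map pvTripl).drop (done.length + 1) := by
        rw [pvDrop_mid]
        exact (pvMem_map_tripl _ _ _).mpr (by rw [hp]; exact List.mem_cons_self ..)
      rw [pvInner, dif_pos hmem, pvSet_mid]
      simp only [List.map_cons]
      have hv : [s + j, e - j, (1 : Int)] = pvTripl p := by
        obtain ⟨h1, h2⟩ := hc; simp [pvTripl, h1, h2]
      have hnin : pvTripl p ∉ done := hdone p (List.mem_cons_self ..)
      have hrem : PySem.List.remove?
            (done ++ [s, e, 1 + j] :: pvTripl p :: rest'.map pvTripl) [s + j, e - j, 1]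
          = some (done ++ [s, e, 1 + j] :: rest'.map pvTripl) := by
        rw [hv]
        have hmem2 : pvTripl p ∈ done ++ [s, e, 1 + j] :: pvTripl p :: rest'.map pvTripl := by
          simp
        rw [PySem.List.remove?_eq_some_erase _ _ hmem2]
        congr 1
        rw [List.erase_append_right _ hnin]
        rw [List.erase_cons_tail (by
          obtain ⟨h1, h2⟩ := hc
          simp [pvTripl]
          intro hs
          omega)]
        rw [List.erase_cons_head]
      rw [hrem]
      simp only [Option.getD_some]
      have h1j : (1 : Int) + j = j + 1 := by ring
      rw [h1j]
      have hge' : ∀ q ∈ rest', s + (j + 1) ≤ q.1 := by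
        intro q hq
        have h1 := hphead q hq
        obtain ⟨hc1, _⟩ := hc
        omega
      rw [ih done s e (j + 1) (by omega)
        (fun q hq => hdone q (List.mem_cons_of_mem _ hq)) hge' hptail]
      rw [pvEat, if_pos hc]
    · have hmem : [s + j, e - j, 1] ∉
          (done ++ [s, e, j] :: (p :: rest').map pvTripl).drop (done.length + 1) := by
        rw [pvDrop_mid]
        intro hm
        rcases List.mem_cons.mp ((pvMem_map_tripl _ _ _).mp hm) with heq | hmm
        · exact hc (by cases p; simp_all)
        · have h1 := hphead _ hmm
          have h2 := hge p (List.mem_cons_self ..)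
          simp at h1
          omega
      rw [pvInner, dif_neg hmem, pvEat, if_neg hc]

-- A's outer loop is pvMerge
lemma pvOuter_eq : ∀ (n : Nat) (Q : List (Int × Int)), Q.length ≤ n → ∀ (done : List (List Int)),
    (∀ x ∈ done, ∃ a t, x = a :: t ∧ ∀ p ∈ Q, a < p.1) →
    Q.Pairwise (fun p q => p.1 < q.1) →
    pvOuter (done ++ Q.map pvTripl) done.length = done ++ pvMerge Q := by
  intro n
  induction n with
  | zero =>
    intro Q hQ done hdone hpair
    obtain rfl : Q = [] := List.eq_nil_of_length_eq_zero (by omega)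
    rw [pvOuter]
    simp [pvMerge]
  | succ n ihn =>
    intro Q hQ done hdone hpair
    cases Q with
    | nil =>
      rw [pvOuter]
      simp [pvMerge]
    | cons p rest =>
      simp only [List.map_cons, pvTripl]
      have hlen : done.length < (done ++ [p.1, p.2, 1] :: rest.map pvTripl).length := by
        simp
      rw [pvOuter, dif_pos hlen]
      have hget : (done ++ [p.1, p.2, 1] :: rest.map pvTripl)[done.length]'hlen = [p.1, p.2, 1] :=
        pvGet_mid done [p.1, p.2, 1] (rest.map pvTripl) hlen
      simp only [hget]
      show pvOuter (pvInner (done ++ [p.1, p.2, 1] :: rest.map pvTripl)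
          done.length p.1 p.2 1 1) (done.length + 1) = done ++ pvMerge (p :: rest)
      obtain ⟨hphead, hptail⟩ := List.pairwise_cons.mp hpair
      have hd1 : ∀ q ∈ rest, pvTripl q ∉ done := by
        intro q hq hmemd
        obtain ⟨a, t, hx, hlt'⟩ := hdone _ hmemd
        have hgt := hlt' q (List.mem_cons_of_mem _ hq)
        rw [pvTripl] at hx
        injection hx with hha _
        omega
      have hd2 : ∀ q ∈ rest, p.1 + 1 ≤ q.1 := fun q hq => by
        have := hphead q hq; omega
      rw [pvInner_eq rest done p.1 p.2 1 le_rfl hd1 hd2 hptail]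
      have hsfx := pvEat_suffix p.1 p.2 rest 1
      have hre : done ++ [p.1, p.2, (pvEat p.1 p.2 1 rest).1] ::
            (pvEat p.1 p.2 1 rest).2.map pvTripl =
          (done ++ [[p.1, p.2, (pvEat p.1 p.2 1 rest).1]]) ++
            (pvEat p.1 p.2 1 rest).2.map pvTripl := by
        simp
      have hlen2 : done.length + 1 = (done ++ [[p.1, p.2, (pvEat p.1 p.2 1 rest).1]]).length := by
        simp
      rw [hre, hlen2, ihn (pvEat p.1 p.2 1 rest).2
        (by have h1 := hsfx.length_le; simp only [List.length_cons] at hQ; omega)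
        (done ++ [[p.1, p.2, (pvEat p.1 p.2 1 rest).1]]) ?_ (hptail.sublist hsfx.sublist)]
      · rw [pvMerge]
        simp
      · intro x hx
        rcases List.mem_append.mp hx with hx | hx
        · obtain ⟨a, t, hx', hlt'⟩ := hdone _ hx
          exact ⟨a, t, hx', fun q hq =>
            hlt' q (List.mem_cons_of_mem _ (hsfx.sublist.subset hq))⟩
        · have hx' : x = [p.1, p.2, (pvEat p.1 p.2 1 rest).1] := by simpa using hx
          exact ⟨p.1, [p.2, (pvEat p.1 p.2 1 rest).1], hx',
            fun q hq => hphead q (hsfx.sublist.subset hq)⟩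

-- under Pre_ the parse loop never hits an empty pile, so it returns
lemma pvParseB_total : ∀ (cs : List Char) (i : Int) (pile : List Int) (pacc : List (Int × Int)),
    (∀ n ∈ List.range (cs.length + 1),
      (cs.take n).count ')' ≤ (cs.take n).count '(' + pile.length) →
    ∃ P, pvParseB cs i pile pacc = some P := by
  intro cs
  induction cs with
  | nil => intro i pile pacc _; exact ⟨pacc, rfl⟩
  | cons c cs ih =>
    intro i pile pacc H
    by_cases h1 : c = '('
    · rw [pvParseB, if_pos h1]
      refine ih (i + 1) (pile ++ [i]) pacc ?_
      intro n hn
      have h := H (n + 1) (by simp at hn ⊢; omega)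
      simp [h1] at h ⊢
      omega
    · by_cases h2 : c = ')'
      · rw [pvParseB, if_neg h1, if_pos h2]
        have hpos : 0 < pile.length := by
          have h := H 1 (by simp)
          simp [h2] at h
          omega
        have hne : pile ≠ [] := by
          intro h; rw [h] at hpos; simp at hpos
        obtain ⟨v, hv⟩ : ∃ v, pile.getLast? = some v := by
          cases hg : pile.getLast? with
          | none => exact absurd (List.getLast?_eq_none_iff.mp hg) hne
          | some v => exact ⟨v, rfl⟩
        rw [show PySem.List.pyGet? pile (-1) = some v from by
          rw [PySem.List.pyGet?_neg_one, hv]]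
        refine ih (i + 1) pile.dropLast (pacc ++ [(v, i)]) ?_
        intro n hn
        have h := H (n + 1) (by simp at hn ⊢; omega)
        have hdl : pile.dropLast.length = pile.length - 1 := by simp
        simp [h2] at h ⊢
        omega
      · rw [pvParseB, if_neg h1, if_neg h2]
        refine ih (i + 1) pile pacc ?_
        intro n hn
        have h := H (n + 1) (by simp at hn ⊢; omega)
        simp [h1, h2] at h ⊢
        omega

theorem pvPorts_eq (refSeq refStr : String) (hpre : Pre_computeRefStems refSeq refStr) :
    computeRefStems refSeq refStr = computeRefStems_alt refSeq refStr := by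
  unfold computeRefStems computeRefStems_alt
  have hrel := pvParse_rel refStr.toList 0 [] []
  simp only [List.map_nil] at hrel
  cases hB : pvParseB refStr.toList 0 [] [] with
  | none =>
    obtain ⟨P, hP⟩ := pvParseB_total refStr.toList 0 [] []
      (fun n hn => by have := hpre n hn; simpa using this)
    rw [hP] at hB
    simp at hB
  | some P =>
    rw [hB] at hrel
    simp only [Option.map_some] at hrel
    rw [hrel]
    show computeMaxStems refSeq (List.map pvTripl P) 1 =
      (PySem.List.sorted2 P (fun p => p.1) (fun p => p.2) false).foldl pvMergeStep []
    unfold computeMaxStems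
    have hnd := pvParseB_nodup refStr.toList 0 [] [] P hB (by simp) (by simp)
    rw [pvSorted_map P, pvFold_eq_merge]
    have hQ := pvQ_pairwise P hnd
    have h := pvOuter_eq (PySem.List.sorted2 P (fun p => p.1) (fun p => p.2) false).length
      (PySem.List.sorted2 P (fun p => p.1) (fun p => p.2) false) le_rfl []
      (by simp) hQ
    simpa using h

-- ===== VERDICT (by name: the statement is the Claim_ definition above) =====
theorem computeRefStems_spec : Claim_equal_computeRefStems := by
  intro refSeq refStr _ hpre
  unfold Spec_computeRefStems
  exact pvPorts_eq refSeq refStr hpre
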